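-- pv_equiv track=rewrite | github.com/Mn3m0syn3/ao3downloader | ao3downloader/__init__.py | get_title_dict
-- ===== SOURCE A (Python) =====
-- def get_title_dict(logs: list[dict]) -> dict[str, str]:
--     dictionary = {}
--     titles = filter(lambda x: 'title' in x and 'link' in x, logs)
--     for obj in list(titles):
--         link = obj['link']
--         if link not in dictionary:
--             title = obj['title']
--             dictionary[link] = title
--     return dictionary
-- ===== SOURCE B (Python) =====
-- def get_title_dict(logs: list[dict]) -> dict[str, str]:
--     result = {}
--     rest = list(logs)
--     while rest:
--         o, rest = rest[0], rest[1:]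
--         if 'title' in o and 'link' in o:
--             link = o['link']
--             result[link] = o['title']
--             rest = [p for p in rest if not ('link' in p and p['link'] == link)]
--     return result
-- ===== Notes on version B (the rewrite author's own statement) =====
-- stated objective: alternative
-- what changed: A filters conforming entries and fills a dict while skipping links already present (membership guard); B keeps no membership state at all: it peels a worklist, inserts each conforming head unconditionally, and prunes every later entry with the same link from the remaining list.
import Mathlib
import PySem

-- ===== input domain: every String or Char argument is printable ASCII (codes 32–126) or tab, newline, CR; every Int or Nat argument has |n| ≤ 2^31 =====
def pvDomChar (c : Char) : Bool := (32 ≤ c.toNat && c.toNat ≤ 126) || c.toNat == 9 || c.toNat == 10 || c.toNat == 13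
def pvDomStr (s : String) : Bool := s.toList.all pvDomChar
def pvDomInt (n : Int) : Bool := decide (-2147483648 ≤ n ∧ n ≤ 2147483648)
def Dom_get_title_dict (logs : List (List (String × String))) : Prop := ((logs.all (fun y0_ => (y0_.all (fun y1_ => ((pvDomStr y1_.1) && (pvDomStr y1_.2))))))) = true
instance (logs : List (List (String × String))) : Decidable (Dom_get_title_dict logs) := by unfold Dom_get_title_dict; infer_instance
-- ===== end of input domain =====

-- B replaces A's membership-guarded dict fill by a worklist loop that inserts the head
-- unconditionally and prunes later entries with the same link from the remaining list
-- (objective: alternative decomposition, same result; not claimed faster).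

-- ===== PORT A =====
-- A's filter lambda: 'title' in x and 'link' in x
def pvCondA (x : List (String × String)) : Bool :=
  (PySem.Dict.mk x).contains "title" && (PySem.Dict.mk x).contains "link"

-- the body of A's for-loop over the filtered list ('titles')
def pvStepA (d : PySem.Dict String String) (obj : List (String × String)) : PySem.Dict String String :=
  match (PySem.Dict.mk obj).get? "link" with
  | none => d  -- unreachable: the filter guarantees 'link' is present
  | some link =>
    if d.contains link then d
    else
      match (PySem.Dict.mk obj).get? "title" with
      | none => d  -- unreachable: the filter guarantees 'title' is present
      | some title => d.insert link title

def get_title_dict (logs : List (List (String × String))) : List (String × String) :=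
  let titles := logs.filter pvCondA
  (titles.foldl pvStepA PySem.Dict.empty).items

-- ===== PORT B =====
-- B's pruning lambda: not ('link' in p and p['link'] == link)
def pvPruneB (link : String) (p : List (String × String)) : Bool :=
  !(match (PySem.Dict.mk p).get? "link" with
    | some l => l == link
    | none => false)

-- B's while-loop: peel the head of the worklist; on a conforming entry insert and
-- prune all later entries with the same link.
def pvGoB : List (List (String × String)) → PySem.Dict String String → PySem.Dict String String
  | [], result => result
  | o :: rest, result =>
    match (PySem.Dict.mk o).get? "title", (PySem.Dict.mk o).get? "link" with
    | some title, some link =>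
        pvGoB (rest.filter (pvPruneB link)) (result.insert link title)
    | _, _ => pvGoB rest result
  termination_by rest _ => rest.length
  decreasing_by
  · have h1 := List.length_filter_le (fun x => pvPruneB link ↑x) rest.attach
    simp at h1 ⊢
    omega
  · exact Nat.lt_succ_self _

def get_title_dict_alt (logs : List (List (String × String))) : List (String × String) :=
  (pvGoB logs PySem.Dict.empty).items

-- ===== PRECONDITION & SPEC =====
def Spec_get_title_dict (logs : List (List (String × String))) (out : List (String × String)) : Prop := out = get_title_dict_alt logs
instance (logs : List (List (String × String))) (out : List (String × String)) : Decidable (Spec_get_title_dict logs out) := by unfold Spec_get_title_dict; infer_instance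

-- ===== CLAIM (what is proved, stated in full; the proofs are below) =====
def Claim_equal_get_title_dict : Prop := ∀ (logs : List (List (String × String))), Dom_get_title_dict logs → Spec_get_title_dict logs (get_title_dict logs)

-- ===== LEMMAS AND PROOFS =====

-- 'pvKeep d p': p survives B's accumulated pruning against the keys already in d
def pvKeep (d : PySem.Dict String String) (p : List (String × String)) : Bool :=
  match (PySem.Dict.mk p).get? "link" with
  | none => true
  | some l => !d.contains l

theorem pvKeep_insert (d : PySem.Dict String String) (link title : String)
    (p : List (String × String)) :
    (pvKeep d p && pvPruneB link p) = pvKeep (d.insert link title) p := by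
  unfold pvKeep pvPruneB
  cases h : (PySem.Dict.mk p).get? "link" with
  | none => simp
  | some l =>
    simp only [PySem.Dict.contains_insert]
    cases hc : d.contains l <;> cases he : (l == link) <;> simp_all

theorem pvMain (logs : List (List (String × String))) (d : PySem.Dict String String) :
    pvGoB (logs.filter (pvKeep d)) d = (logs.filter pvCondA).foldl pvStepA d := by
  induction logs generalizing d with
  | nil => simp [pvGoB]
  | cons o rest ih =>
    by_cases hk : pvKeep d o = true
    · -- o survives B's accumulated pruning
      rw [List.filter_cons_of_pos hk]
      cases ht : (PySem.Dict.mk o).get? "title" with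
      | none =>
        -- nonconforming (no title): both sides skip o
        rw [pvGoB]
        split
        · rename_i t l h1 h2
          rw [ht] at h1; exact absurd h1 (by simp)
        · have hcond : pvCondA o = false := by
            unfold pvCondA
            rw [PySem.Dict.contains_eq_isSome_get?, ht]; simp
          rw [List.filter_cons_of_neg (by simp [hcond])]
          exact ih d
      | some title =>
        cases hl : (PySem.Dict.mk o).get? "link" with
        | none =>
          -- nonconforming (no link): both sides skip o
          rw [pvGoB]
          split
          · rename_i t l h1 h2
            rw [hl] at h2; exact absurd h2 (by simp)
          · have hcond : pvCondA o = false := by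
              unfold pvCondA
              rw [PySem.Dict.contains_eq_isSome_get?, PySem.Dict.contains_eq_isSome_get?, hl]; simp
            rw [List.filter_cons_of_neg (by simp [hcond])]
            exact ih d
        | some link =>
          -- conforming and link ∉ d: both sides insert (link, title)
          have hnc : d.contains link = false := by
            unfold pvKeep at hk; rw [hl] at hk; simpa using hk
          have hcond : pvCondA o = true := by
            unfold pvCondA
            rw [PySem.Dict.contains_eq_isSome_get?, PySem.Dict.contains_eq_isSome_get?, ht, hl]; simp
          rw [List.filter_cons_of_pos hcond]
          rw [pvGoB]
          split
          · rename_i t l h1 h2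
            rw [ht] at h1; rw [hl] at h2
            obtain rfl : title = t := Option.some.inj h1
            obtain rfl : link = l := Option.some.inj h2
            rw [List.filter_filter]
            have hfe : (fun p => pvPruneB link p && pvKeep d p) = pvKeep (d.insert link title) := by
              funext p; rw [Bool.and_comm]; exact pvKeep_insert d link title p
            rw [hfe, ih (d.insert link title)]
            simp [pvStepA, hl, ht, hnc]
          · rename_i hno
            exact (hno title link ht hl).elim
    · -- o pruned by B: its link is already in d, so A's loop skips it too
      rw [List.filter_cons_of_neg (by simpa using hk)]
      unfold pvKeep at hk
      cases hl : (PySem.Dict.mk o).get? "link" with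
      | none => rw [hl] at hk; simp at hk
      | some l =>
        rw [hl] at hk; simp at hk
        by_cases hcond : pvCondA o = true
        · rw [List.filter_cons_of_pos hcond, List.foldl_cons]
          have hstep : pvStepA d o = d := by
            simp [pvStepA, hl, hk]
          rw [hstep]; exact ih d
        · rw [List.filter_cons_of_neg (by simpa using hcond)]
          exact ih d

theorem pvKeep_empty (p : List (String × String)) : pvKeep PySem.Dict.empty p = true := by
  unfold pvKeep
  cases h : (PySem.Dict.mk p).get? "link" <;> simp [PySem.Dict.contains_empty]

-- ===== VERDICT (by name: the statement is the Claim_ definition above) =====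
theorem get_title_dict_spec : Claim_equal_get_title_dict := by
  intro logs _
  unfold Spec_get_title_dict get_title_dict get_title_dict_alt
  have h := pvMain logs PySem.Dict.empty
  rw [List.filter_eq_self.mpr (fun p _ => pvKeep_empty p)] at h
  rw [h]
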